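-- pv_equiv track=rewrite | github.com/xvillaneau/adventofcode-python | aoc_2015/src/aoc_2015_simple/day_01.py | top_floor
-- ===== SOURCE A (Python) =====
-- def top_floor(data):
--     floor = 0
--     for character in data:
--         if character == "(":
--             floor += 1
--         else:
--             floor -= 1
--     return floor
-- ===== SOURCE B (Python) =====
-- def top_floor(data):
--     # Closed form: each '(' contributes +1 and every other character -1,
--     # so the result is ups - (len - ups) = 2*ups - len.
--     ups = data.count("(")
--     return 2 * ups - len(data)
-- ===== Notes on version B (the rewrite author's own statement) =====
-- stated objective: simpler
-- what changed: Replaces the per-character branch-and-accumulate loop with the closed form 2*data.count('(') - len(data) (using len, not count(')'), since A treats every non-'(' character as -1).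
import Mathlib
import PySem

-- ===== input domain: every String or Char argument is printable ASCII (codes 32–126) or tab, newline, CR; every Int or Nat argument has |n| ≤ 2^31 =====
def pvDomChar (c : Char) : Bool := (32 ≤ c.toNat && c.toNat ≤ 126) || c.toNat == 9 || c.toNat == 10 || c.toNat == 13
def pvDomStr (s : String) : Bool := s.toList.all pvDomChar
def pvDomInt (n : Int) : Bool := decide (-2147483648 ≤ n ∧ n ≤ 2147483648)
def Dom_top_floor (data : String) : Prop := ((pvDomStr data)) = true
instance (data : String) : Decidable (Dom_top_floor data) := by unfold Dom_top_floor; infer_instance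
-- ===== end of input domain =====

-- B replaces A's per-character branch-and-accumulate loop with the closed form
-- 2 * data.count('(') - len(data); simpler, same result.


-- ===== PORT A =====
def top_floor (data : String) : Int :=
  data.toList.foldl (fun floor character =>
    if character == '(' then floor + 1 else floor - 1) 0

-- ===== PORT B =====
def top_floor_alt (data : String) : Int :=
  2 * (PySem.Str.count data "(" : Int) - PySem.Str.len data

-- ===== PRECONDITION & SPEC =====
def Spec_top_floor (data : String) (out : Int) : Prop := out = top_floor_alt data
instance (data : String) (out : Int) : Decidable (Spec_top_floor data out) := by unfold Spec_top_floor; infer_instance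

-- ===== CLAIM (what is proved, stated in full; the proofs are below) =====
def Claim_equal_top_floor : Prop := ∀ (data : String), Dom_top_floor data → Spec_top_floor data (top_floor data)

-- ===== LEMMAS AND PROOFS =====

-- Chars.count with a one-character needle is List.count
theorem pv_go_single (c : Char) : ∀ (fuel : Nat) (s : List Char) (acc : Nat),
    s.length ≤ fuel → PySem.Chars.count.go [c] fuel s acc = acc + s.count c := by
  intro fuel
  induction fuel with
  | zero => intro s acc h; cases s with
    | nil => simp [PySem.Chars.count.go]
    | cons a t => simp at h
  | succ n ih =>
    intro s acc h
    cases s with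
    | nil => simp [PySem.Chars.count.go]
    | cons a t =>
      rw [PySem.Chars.count.go]
      by_cases hc : a = c
      · simp [hc, List.isPrefixOf, ih t (acc + 1) (by simpa using h)]
        omega
      · simp [List.isPrefixOf, Ne.symm hc, hc, ih t acc (by simpa using h)]

theorem pv_count_single (s : List Char) (c : Char) :
    PySem.Chars.count s [c] = s.count c := by
  simp [PySem.Chars.count, pv_go_single c s.length s 0 le_rfl]

-- A's loop computes the closed form 2*count - length
theorem pv_fold_closed (cs : List Char) : ∀ (acc : Int),
    cs.foldl (fun floor character =>
      if character == '(' then floor + 1 else floor - 1) acc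
      = acc + 2 * (cs.count '(' : Int) - cs.length := by
  induction cs with
  | nil => intro acc; simp
  | cons a t ih =>
    intro acc
    rw [List.foldl_cons, ih]
    by_cases ha : a = '('
    · simp [ha, List.count_cons]
      ring
    · simp [ha]
      ring

-- ===== VERDICT (by name: the statement is the Claim_ definition above) =====
theorem top_floor_spec : Claim_equal_top_floor := by
  intro data _
  unfold Spec_top_floor top_floor top_floor_alt
  rw [pv_fold_closed data.toList 0]
  simp [PySem.Str.count, PySem.Str.len, pv_count_single]
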